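-- pv_equiv track=rewrite | github.com/bled1908/SmartInterviews-DSA | Team-based-contest-3/longest_substring_with_max_k_vowels.py | long_substring
-- ===== SOURCE A (Python) =====
-- def is_vowel(c):
--     return c in 'aeiou'
--
-- def long_substring(k, s):
--     n = len(s)
--     start = 0
--     vowel_count = 0
--     max_len = 0
--
--     for end in range(n):
--         if is_vowel(s[end]):
--             vowel_count += 1
--
--         while vowel_count > k:
--             if is_vowel(s[start]):
--                 vowel_count -= 1
--             start += 1
--
--         max_len = max(max_len, end - start + 1)
--
--     return max_len
-- ===== SOURCE B (Python) =====
-- def is_vowel(c):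
--     return c in 'aeiou'
--
-- def long_substring(k, s):
--     n = len(s)
--     pos = [i for i, c in enumerate(s) if is_vowel(c)]
--     m = len(pos)
--     if m <= k:
--         return n
--     pad = [-1] + pos + [n]
--     return max(pad[i + k + 1] - pad[i] - 1 for i in range(m - k + 1))
-- ===== Notes on version B (the rewrite author's own statement) =====
-- stated objective: faster
-- what changed: Replaces the two-pointer sliding-window scan (per-character inner while loop adjusting start/vowel_count) with a vowel-index table: collect all vowel positions once, pad with sentinels -1 and n, and take the max gap pad[i+k+1]-pad[i]-1 over windows enclosing exactly k vowels.
-- outside the precondition, e.g. on long_substring(-1, ''): A returns 0, B returns -1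
import Mathlib
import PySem

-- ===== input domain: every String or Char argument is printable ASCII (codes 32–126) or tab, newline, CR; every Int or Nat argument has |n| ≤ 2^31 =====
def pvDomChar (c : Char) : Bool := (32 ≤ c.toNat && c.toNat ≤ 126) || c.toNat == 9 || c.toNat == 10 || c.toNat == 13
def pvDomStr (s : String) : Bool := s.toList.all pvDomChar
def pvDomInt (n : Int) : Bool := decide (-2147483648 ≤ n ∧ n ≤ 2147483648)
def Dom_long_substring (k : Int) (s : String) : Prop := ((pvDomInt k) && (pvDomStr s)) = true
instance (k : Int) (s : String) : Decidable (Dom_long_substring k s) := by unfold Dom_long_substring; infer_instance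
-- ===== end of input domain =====

-- B replaces A's two-pointer sliding-window scan with a vowel-position table and a max over
-- sentinel-padded gaps (alternative decomposition, same O(n) cost; return-value equivalence).

-- ===== PORT A =====
-- is_vowel(c): c in 'aeiou'  (shared helper of the module, used by both ports)
def isVowel (c : Char) : Bool := ['a', 'e', 'i', 'o', 'u'].contains c

-- the inner `while vowel_count > k:` loop of A; the fuel argument only makes the recursion
-- structural (fuel n+1 is never exhausted when k ≥ 0, proved below); cs.getD start 'x'
-- is s[start], which is in range whenever the loop body runs under Pre_.
def whileA (cs : List Char) (k : Int) : Nat → Int → Nat → Int × Nat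
  | 0, vc, start => (vc, start)
  | fuel + 1, vc, start =>
    if vc > k then
      whileA cs k fuel (if isVowel (cs.getD start 'x') then vc - 1 else vc) (start + 1)
    else (vc, start)

-- one iteration of A's `for end in range(n):` body; state = (start, vowel_count, max_len)
def stepA (cs : List Char) (k : Int) (st : Nat × Int × Int) (e : Nat) : Nat × Int × Int :=
  let vc1 := if isVowel (cs.getD e 'x') then st.2.1 + 1 else st.2.1
  let ws := whileA cs k (cs.length + 1) vc1 st.1
  (ws.2, ws.1, max st.2.2 ((e : Int) - (ws.2 : Int) + 1))

def long_substring (k : Int) (s : String) : Int :=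
  let cs := s.toList
  ((List.range cs.length).foldl (stepA cs k) (0, 0, 0)).2.2

-- ===== PORT B =====
def long_substring_alt (k : Int) (s : String) : Int :=
  let cs := s.toList
  let n : Int := cs.length
  let pos : List Int := ((PySem.List.enumerate cs 0).filter (fun p => isVowel p.2)).map (fun p => p.1)
  let m : Int := pos.length
  if m ≤ k then n
  else
    let pad : List Int := -1 :: pos ++ [n]
    let terms : List Int := (PySem.List.pyRange 0 (m - k + 1) 1).map
      (fun i => PySem.List.pyGetD pad (i + k + 1) 0 - PySem.List.pyGetD pad i 0 - 1)
    (PySem.List.max? terms (fun x => x)).getD 0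

-- ===== PRECONDITION & SPEC =====
-- Pre_ excludes negative k, on which A raises IndexError for every nonempty s; the sole
-- returning input there (k < 0 with the empty string) is a degenerate corner.
def Pre_long_substring (k : Int) (_s : String) : Prop := 0 ≤ k
instance (k : Int) (s : String) : Decidable (Pre_long_substring k s) := by unfold Pre_long_substring; infer_instance
def pvWitness_long_substring : Int × String := (1, "leetcode")

def Spec_long_substring (k : Int) (s : String) (out : Int) : Prop := out = long_substring_alt k s
instance (k : Int) (s : String) (out : Int) : Decidable (Spec_long_substring k s out) := by unfold Spec_long_substring; infer_instance

-- ===== CLAIM (what is proved, stated in full; the proofs are below) =====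
def Claim_equal_long_substring : Prop := ∀ (k : Int) (s : String), Dom_long_substring k s → Pre_long_substring k s → Spec_long_substring k s (long_substring k s)

-- ===== LEMMAS AND PROOFS =====

-- vowel positions of a char list, the reference object both ports are reduced to
def vposN (cs : List Char) : List Nat :=
  (List.range cs.length).filter (fun i => isVowel (cs.getD i 'x'))

-- the window start A's two-pointer scan settles on after consuming t
def startN (kn : Nat) (t : List Char) : Nat :=
  let P := vposN t
  if P.length ≤ kn then 0 else P.getD (P.length - kn - 1) 0 + 1

def padL (P : List Nat) (n : Nat) : List Int :=
  -1 :: P.map (fun x => Int.ofNat x) ++ [(n : Int)]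

def gmax : List Int → Int
  | [] => 0
  | h :: t => t.foldl max h

-- reference value of B on a char list with Nat-valued k
def Bval (kn : Nat) (cs : List Char) : Int :=
  let P := vposN cs
  if P.length ≤ kn then (cs.length : Int)
  else gmax ((List.range (P.length - kn + 1)).map
    (fun i => (padL P cs.length).getD (i + kn + 1) 0 - (padL P cs.length).getD i 0 - 1))

lemma vposN_snoc (cs : List Char) (c : Char) :
    vposN (cs ++ [c]) = vposN cs ++ (if isVowel c then [cs.length] else []) := by
  unfold vposN
  rw [List.length_append, List.length_singleton, List.range_succ, List.filter_append]
  congr 1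
  · apply List.filter_congr
    intro i hi
    simp only [List.mem_range] at hi
    rw [List.getD_append _ _ _ _ hi]
  · have hget : ((cs ++ [c])[cs.length]?).getD 'x' = c := by
      simp
    simp only [List.filter]
    split <;> simp_all

lemma vposN_mem (cs : List Char) (j : Nat) :
    j ∈ vposN cs ↔ j < cs.length ∧ isVowel (cs.getD j 'x') = true := by
  simp [vposN]

lemma vposN_pairwise (cs : List Char) : (vposN cs).Pairwise (· < ·) := by
  exact List.Pairwise.filter _ (List.pairwise_lt_range)

lemma gmax_append (l : List Int) (x : Int) (h : l ≠ []) :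
    gmax (l ++ [x]) = max (gmax l) x := by
  cases l with
  | nil => simp at h
  | cons a t => simp [gmax, List.foldl_append]

lemma padL_getD_mid (P : List Nat) (n : Nat) (j : Nat) (h : j < P.length) :
    (padL P n).getD (j + 1) 0 = (P[j] : Int) := by
  have h1 : (padL P n)[j + 1]? = (P.map (fun x => Int.ofNat x))[j]? := by
    simp only [padL, List.cons_append, List.getElem?_cons_succ]
    exact List.getElem?_append_left (by simpa using h)
  rw [List.getD, h1, List.getElem?_map, List.getElem?_eq_getElem h]
  rfl

lemma padL_getD_last (P : List Nat) (n : Nat) :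
    (padL P n).getD (P.length + 1) 0 = (n : Int) := by
  have h1 : (padL P n)[P.length + 1]? = some (n : Int) := by
    simp only [padL, List.cons_append, List.getElem?_cons_succ]
    rw [List.getElem?_append_right (by simp)]
    simp
  rw [List.getD, h1]
  rfl

lemma whileA_noop (cs : List Char) (k : Int) (fuel : Nat) (vc : Int) (s : Nat)
    (h : ¬ vc > k) : whileA cs k fuel vc s = (vc, s) := by
  cases fuel <;> simp [whileA, h]

lemma whileA_run (cs : List Char) (kn : Nat) :
    ∀ (fuel s0 q : Nat), s0 ≤ q → q - s0 < fuel →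
      isVowel (cs.getD q 'x') = true →
      (∀ j, s0 ≤ j → j < q → isVowel (cs.getD j 'x') = false) →
      whileA cs (kn : Int) fuel ((kn : Int) + 1) s0 = ((kn : Int), q + 1) := by
  intro fuel
  induction fuel with
  | zero => intro s0 q h1 h2 h3 h4; omega
  | succ f ih =>
    intro s0 q h1 h2 h3 h4
    rw [whileA]
    have hgt : (kn : Int) + 1 > kn := by omega
    rw [if_pos hgt]
    simp only [List.getD] at *
    by_cases hv : isVowel (cs[s0]?.getD 'x') = true
    · have hs0q : s0 = q := by
        by_contra hne
        have := h4 s0 le_rfl (by omega)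
        rw [this] at hv; exact Bool.false_ne_true hv
      subst hs0q
      rw [if_pos hv, (by omega : (kn : Int) + 1 - 1 = kn)]
      exact whileA_noop _ _ _ _ _ (by omega)
    · have hlt : s0 < q := by
        rcases Nat.lt_or_ge s0 q with h | h
        · exact h
        · have : s0 = q := by omega
          subst this; rw [h3] at hv; exact absurd rfl hv
      rw [if_neg hv]
      exact ih (s0 + 1) q (by omega) (by omega) h3 (fun j hj1 hj2 => h4 j (by omega) hj2)

lemma sorted_mono (P : List Nat) (hP : P.Pairwise (· < ·)) (i j : Nat) (hi : i < j)
    (hj : j < P.length) : P[i]'(by omega) < P[j] :=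
  List.pairwise_iff_getElem.mp hP i j (by omega) hj hi

lemma padEq1 (P : List Nat) (e : Nat) (j : Nat) (hj : j ≤ P.length + 1) :
    (padL (P ++ [e]) (e + 1)).getD j 0 = (padL P e).getD j 0 := by
  match j with
  | 0 => rfl
  | j' + 1 =>
    rcases Nat.lt_or_ge j' P.length with h | h
    · rw [padL_getD_mid _ _ _ (by simp; omega), padL_getD_mid _ _ _ h,
        List.getElem_append_left h]
    · have hj' : j' = P.length := by omega
      subst hj'
      rw [padL_getD_mid _ _ _ (by simp), padL_getD_last]
      simp

lemma padEq2 (P : List Nat) (e : Nat) (j : Nat) (hj : j ≤ P.length) :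
    (padL P (e + 1)).getD j 0 = (padL P e).getD j 0 := by
  match j with
  | 0 => rfl
  | j' + 1 => rw [padL_getD_mid _ _ _ (by omega), padL_getD_mid _ _ _ (by omega)]

lemma Bval_snoc (kn : Nat) (t : List Char) (c : Char) :
    Bval kn (t ++ [c]) =
      max (Bval kn t) ((t.length : Int) + 1 - (startN kn (t ++ [c]) : Int)) := by
  have hsnoc := vposN_snoc t c
  by_cases hm' : (vposN (t ++ [c])).length ≤ kn
  · have hm : (vposN t).length ≤ kn := by
      rw [hsnoc] at hm'
      by_cases hvc : isVowel c <;> simp [hvc] at hm' <;> omega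
    have hs : startN kn (t ++ [c]) = 0 := by simp [startN, hm']
    rw [hs]
    unfold Bval
    simp only [hm', hm, if_pos, List.length_append, List.length_singleton]
    push_cast
    omega
  · -- m' > kn
    have hm'' : kn < (vposN (t ++ [c])).length := by omega
    set P' := vposN (t ++ [c]) with hP'
    set m' := P'.length with hm'def
    have hi0 : m' - kn - 1 < m' := by omega
    have htop : m' - kn + 1 = (m' - kn - 1 + 1) + 1 := by omega
    have hlen' : (t ++ [c]).length = t.length + 1 := by simp
    -- startN value
    have hstart : (startN kn (t ++ [c]) : Int) = (P'[m' - kn - 1]'hi0 : Int) + 1 := by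
      unfold startN
      rw [← hP']
      simp only [hm', ← hm'def]
      rw [List.getD_eq_getElem _ _ hi0]
      push_cast; ring
    -- unfold Bval of t ++ [c]
    rw [Bval]
    simp only [← hP', ← hm'def, hm', hlen']
    rw [htop, List.range_succ, List.map_append, List.map_cons, List.map_nil]
    rw [gmax_append _ _ (by simp [List.range_succ])]
    -- last term
    have hlast : (padL P' (t.length + 1)).getD ((m' - kn - 1 + 1) + kn + 1) 0 -
        (padL P' (t.length + 1)).getD (m' - kn - 1 + 1) 0 - 1 =
        (t.length : Int) + 1 - ((P'[m' - kn - 1]'hi0 : Int) + 1) := by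
      have h1 : (m' - kn - 1 + 1) + kn + 1 = m' + 1 := by omega
      rw [h1, padL_getD_last, padL_getD_mid _ _ _ hi0]
      push_cast; ring
    rw [hlast, hstart]
    by_cases hvc : isVowel c
    · -- P' = P ++ [t.length]
      have hP'' : P' = vposN t ++ [t.length] := by rw [hsnoc, if_pos hvc]
      have hmm : m' = (vposN t).length + 1 := by rw [hm'def, hP'']; simp
      have hpadeq : ∀ j, j ≤ m' →
          (padL P' (t.length + 1)).getD j 0 = (padL (vposN t) t.length).getD j 0 := by
        intro j hj
        rw [hP'']
        exact padEq1 _ _ _ (by omega)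
      have hg : gmax ((List.range (m' - kn - 1 + 1)).map
          (fun i => (padL P' (t.length + 1)).getD (i + kn + 1) 0 -
            (padL P' (t.length + 1)).getD i 0 - 1)) = Bval kn t := by
        rcases Nat.lt_or_ge kn (vposN t).length with hk | hk
        · have h5 : m' - kn - 1 + 1 = (vposN t).length - kn + 1 := by omega
          rw [h5, Bval]
          simp only [Nat.not_le.mpr hk, if_neg, not_false_iff]
          congr 1
          apply List.map_congr_left
          intro i hi
          rw [List.mem_range] at hi
          rw [hpadeq (i + kn + 1) (by omega), hpadeq i (by omega)]
        · have hkeq : (vposN t).length = kn := by omega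
          have h1 : m' - kn - 1 + 1 = 1 := by omega
          rw [h1]
          have h2 : List.range 1 = [0] := rfl
          rw [h2, List.map_cons, List.map_nil]
          have h6 : P'[kn]'(by omega) = t.length := by
            rw [List.getElem_of_eq hP'' (by omega), List.getElem_append_right (by omega)]
            simp [hkeq]
          have h3 : (padL P' (t.length + 1)).getD (0 + kn + 1) 0 = (t.length : Int) := by
            rw [Nat.zero_add, padL_getD_mid _ _ kn (by omega), h6]
          have h4 : (padL P' (t.length + 1)).getD 0 0 = -1 := rfl
          rw [h3, h4, Bval]
          simp only [hkeq, le_refl, if_pos]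
          simp [gmax]
      rw [hg]
      simp
    · -- c not a vowel: P' = vposN t, only the sentinel moved
      have hP'' : P' = vposN t := by rw [hsnoc, if_neg hvc]; simp
      have hk : kn < (vposN t).length := by rw [← hP'']; omega
      have hmm : m' = (vposN t).length := by rw [hm'def, hP'']
      have hpadeq : ∀ j, j ≤ m' →
          (padL P' (t.length + 1)).getD j 0 = (padL (vposN t) t.length).getD j 0 := by
        intro j hj
        rw [hP'']
        exact padEq2 _ _ _ (by omega)
      have hold : Bval kn t =
          max (gmax ((List.range (m' - kn - 1 + 1)).map
            (fun i => (padL P' (t.length + 1)).getD (i + kn + 1) 0 -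
              (padL P' (t.length + 1)).getD i 0 - 1)))
            ((t.length : Int) - (P'[m' - kn - 1]'hi0 : Int) - 1) := by
        rw [Bval]
        simp only [Nat.not_le.mpr hk, if_neg, not_false_iff]
        have hsplit : (vposN t).length - kn + 1 = ((vposN t).length - kn - 1 + 1) + 1 := by omega
        rw [hsplit, List.range_succ, List.map_append, List.map_cons, List.map_nil]
        rw [gmax_append _ _ (by simp [List.range_succ])]
        have h5 : (vposN t).length - kn - 1 + 1 = m' - kn - 1 + 1 := by omega
        congr 1
        · rw [h5]
          refine congrArg gmax (List.map_congr_left ?_)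
          intro i hi
          rw [List.mem_range] at hi
          rw [hpadeq (i + kn + 1) (by omega), hpadeq i (by omega)]
        · have h6 : (vposN t).length - kn - 1 + 1 + kn + 1 = (vposN t).length + 1 := by omega
          rw [h6, padL_getD_last]
          rw [padL_getD_mid _ _ _ (by omega)]
          have h7 : P'[m' - kn - 1]'hi0 = (vposN t)[(vposN t).length - kn - 1]'(by omega) := by
            congr 1
            omega
          rw [h7]
      rw [hold]
      have hle : (t.length : Int) - (P'[m' - kn - 1]'hi0 : Int) - 1 ≤
          (t.length : Int) + 1 - ((P'[m' - kn - 1]'hi0 : Int) + 1) := by omega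
      rw [max_assoc, max_eq_right hle]
      simp

lemma getD_take (cs : List Char) (j n : Nat) (h : j < n) :
    (cs.take n).getD j 'x' = cs.getD j 'x' := by
  rw [List.getD, List.getD, List.getElem?_take_of_lt h]

lemma invA (kn : Nat) (cs : List Char) :
    ∀ e, e ≤ cs.length →
      (List.range e).foldl (stepA cs (kn : Int)) (0, 0, 0) =
        (startN kn (cs.take e), ((min (vposN (cs.take e)).length kn : Nat) : Int),
          Bval kn (cs.take e)) := by
  intro e
  induction e with
  | zero =>
    intro _
    simp [startN, Bval, vposN]
  | succ e ih =>
    intro h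
    rw [List.range_succ, List.foldl_append, ih (by omega), List.foldl_cons, List.foldl_nil]
    have he : e < cs.length := by omega
    have htake : cs.take (e + 1) = cs.take e ++ [cs[e]] :=
      List.take_succ_eq_append_getElem he
    set t := cs.take e with ht
    have hte : t.length = e := by rw [ht]; simp; omega
    have hgetD : cs.getD e 'x' = cs[e] := by
      rw [List.getD, List.getElem?_eq_getElem he]; rfl
    set c := cs[e] with hc
    have hsnoc := vposN_snoc t c
    have hP'pair : (vposN (t ++ [c])).Pairwise (· < ·) := vposN_pairwise _
    -- a vowel of t ++ [c] is a vowel of cs (at the same index < e + 1)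
    have hvowcs : ∀ j, j ∈ vposN (t ++ [c]) → j < e + 1 ∧ isVowel (cs.getD j 'x') = true := by
      intro j hj
      have h1 := (vposN_mem _ _).1 hj
      have hlen : (t ++ [c]).length = e + 1 := by simp [hte]
      rw [hlen] at h1
      refine ⟨h1.1, ?_⟩
      have : (t ++ [c]).getD j 'x' = cs.getD j 'x' := by
        rw [← htake]; exact getD_take cs j (e + 1) h1.1
      rw [← this]; exact h1.2
    have hvowcs' : ∀ j, j < e + 1 → isVowel (cs.getD j 'x') = true → j ∈ vposN (t ++ [c]) := by
      intro j hj1 hj2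
      rw [vposN_mem]
      have hlen : (t ++ [c]).length = e + 1 := by simp [hte]
      rw [hlen]
      refine ⟨hj1, ?_⟩
      have : (t ++ [c]).getD j 'x' = cs.getD j 'x' := by
        rw [← htake]; exact getD_take cs j (e + 1) hj1
      rw [this]; exact hj2
    rw [htake]
    simp only [stepA, hgetD]
    by_cases hvc : isVowel c
    · rw [if_pos hvc]
      by_cases hk : (vposN t).length < kn
      · -- fewer than k vowels even after adding one: while loop does not run
        have hmin : min (vposN t).length kn = (vposN t).length := by omega
        rw [hmin]
        have hnoop : whileA cs (kn : Int) (cs.length + 1)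
            (((vposN t).length : Int) + 1) (startN kn t) =
            (((vposN t).length : Int) + 1, startN kn t) :=
          whileA_noop _ _ _ _ _ (by omega)
        rw [hnoop]
        have hP' : vposN (t ++ [c]) = vposN t ++ [t.length] := by rw [hsnoc, if_pos hvc]
        have hm' : (vposN (t ++ [c])).length = (vposN t).length + 1 := by rw [hP']; simp
        have hs0 : startN kn t = 0 := by unfold startN; rw [if_pos (by omega)]
        have hs' : startN kn (t ++ [c]) = 0 := by unfold startN; rw [if_pos (by omega)]
        have hmin' : min (vposN (t ++ [c])).length kn = (vposN t).length + 1 := by omega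
        rw [Bval_snoc, hs0, hs']
        refine Prod.ext ?_ (Prod.ext ?_ ?_) <;> simp [hm', hte]; omega
      · -- the window already holds k vowels: the while loop advances past one vowel
        have hk' : kn ≤ (vposN t).length := by omega
        have hmin : min (vposN t).length kn = kn := by omega
        rw [hmin]
        have hP' : vposN (t ++ [c]) = vposN t ++ [t.length] := by rw [hsnoc, if_pos hvc]
        have hm' : (vposN (t ++ [c])).length = (vposN t).length + 1 := by rw [hP']; simp
        have hi0 : (vposN (t ++ [c])).length - kn - 1 < (vposN (t ++ [c])).length := by omega
        set q := (vposN (t ++ [c]))[(vposN (t ++ [c])).length - kn - 1]'hi0 with hq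
        have hqmem : q ∈ vposN (t ++ [c]) := by rw [hq]; exact List.getElem_mem _
        have hqe := hvowcs q hqmem
        -- start ≤ q
        have hs0q : startN kn t ≤ q := by
          unfold startN
          by_cases hmk : (vposN t).length ≤ kn
          · rw [if_pos hmk]; omega
          · rw [if_neg hmk]
            have hidx : (vposN t).length - kn - 1 < (vposN t).length := by omega
            rw [List.getD_eq_getElem _ _ hidx]
            have heq : (vposN t)[(vposN t).length - kn - 1]'hidx =
                (vposN (t ++ [c]))[(vposN t).length - kn - 1]'(by omega) := by
              rw [List.getElem_of_eq hP' (by omega)]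
              rw [List.getElem_append_left hidx]
            have hlt : (vposN (t ++ [c]))[(vposN t).length - kn - 1]'(by omega) < q := by
              rw [hq]
              exact sorted_mono _ hP'pair _ _ (by omega) hi0
            omega
        -- no vowel strictly between start and q
        have hnov : ∀ j, startN kn t ≤ j → j < q → isVowel (cs.getD j 'x') = false := by
          intro j hj1 hj2
          by_contra hcon
          have hcon' : isVowel (cs.getD j 'x') = true := by
            cases hb : isVowel (cs.getD j 'x')
            · exact absurd hb hcon
            · rfl
          have hjlt : j < e + 1 := by omega
          have hjmem := hvowcs' j hjlt hcon'
          obtain ⟨idx, hidx, hidxeq⟩ := List.mem_iff_getElem.mp hjmem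
          have hidxlt : idx < (vposN (t ++ [c])).length - kn - 1 := by
            by_contra hge
            rcases Nat.eq_or_lt_of_le (Nat.le_of_not_lt hge) with heq | hlt
            · have hqj : q = j := by
                rw [hq, ← hidxeq]
                congr 1
              omega
            · have := sorted_mono _ hP'pair _ _ hlt hidx
              rw [hidxeq] at this; rw [← hq] at this; omega
          -- so j lies before the old start
          unfold startN at hj1
          by_cases hmk : (vposN t).length ≤ kn
          · omega
          · rw [if_neg hmk] at hj1
            have hidx2 : (vposN t).length - kn - 1 < (vposN t).length := by omega
            rw [List.getD_eq_getElem _ _ hidx2] at hj1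
            have heq2 : (vposN t)[(vposN t).length - kn - 1]'hidx2 =
                (vposN (t ++ [c]))[(vposN t).length - kn - 1]'(by omega) := by
              rw [List.getElem_of_eq hP' (by omega)]
              rw [List.getElem_append_left hidx2]
            have hle2 : j ≤ (vposN (t ++ [c]))[(vposN t).length - kn - 1]'(by omega) := by
              rcases Nat.eq_or_lt_of_le (Nat.le_of_lt_succ (by omega : idx < (vposN t).length - kn - 1 + 1)) with heq3 | hlt3
              · rw [← hidxeq]
                have : (vposN t).length - kn - 1 = idx := by omega
                subst this; rfl
              · have := sorted_mono _ hP'pair idx ((vposN t).length - kn - 1) (by omega) (by omega)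
                rw [hidxeq] at this; omega
            omega
        have hrun := whileA_run cs kn (cs.length + 1) (startN kn t) q hs0q
          (by omega) hqe.2 hnov
        rw [hrun]
        -- assemble the three components
        have hs' : startN kn (t ++ [c]) = q + 1 := by
          unfold startN
          rw [if_neg (by omega)]
          rw [List.getD_eq_getElem _ _ hi0, hq]
        have hmin' : min (vposN (t ++ [c])).length kn = kn := by omega
        rw [Bval_snoc, hs', hmin']
        have : ((e : Int) - ((q + 1 : Nat) : Int) + 1) = (t.length : Int) + 1 - ((q + 1 : Nat) : Int) := by
          rw [hte]; push_cast; ring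
        rw [this]
    · rw [if_neg hvc]
      have hnoop : whileA cs (kn : Int) (cs.length + 1)
          ((min (vposN t).length kn : Nat) : Int) (startN kn t) =
          (((min (vposN t).length kn : Nat) : Int), startN kn t) :=
        whileA_noop _ _ _ _ _ (by
          have := Nat.min_le_right (vposN t).length kn
          push_cast; omega)
      rw [hnoop]
      have hP' : vposN (t ++ [c]) = vposN t := by rw [hsnoc, if_neg hvc]; simp
      have hs' : startN kn (t ++ [c]) = startN kn t := by unfold startN; rw [hP']
      rw [Bval_snoc, hs', hP']
      have : ((e : Int) - (startN kn t : Int) + 1) = (t.length : Int) + 1 - (startN kn t : Int) := by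
        rw [hte]; ring
      rw [this]

lemma vposN_cons (c : Char) (cs : List Char) :
    vposN (c :: cs) = (if isVowel c then [0] else []) ++ (vposN cs).map (· + 1) := by
  unfold vposN
  rw [List.length_cons, List.range_succ_eq_map, List.filter_cons]
  have h0 : (c :: cs).getD 0 'x' = c := rfl
  rw [h0]
  have h1 : (List.map Nat.succ (List.range cs.length)).filter
      (fun i => isVowel ((c :: cs).getD i 'x')) =
      ((List.range cs.length).filter (fun i => isVowel (cs.getD i 'x'))).map Nat.succ := by
    rw [List.filter_map]
    rfl
  rw [h1]
  by_cases hvc : isVowel c <;> simp [hvc]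

lemma enumFilter (cs : List Char) :
    ∀ s0 : Nat, ((PySem.List.enumerate cs (s0 : Int)).filter (fun p => isVowel p.2)).map
        (fun p => p.1) = (vposN cs).map (fun j => ((s0 + j : Nat) : Int)) := by
  induction cs with
  | nil => intro s0; simp [PySem.List.enumerate_nil, vposN]
  | cons c cs ih =>
    intro s0
    rw [PySem.List.enumerate_cons, vposN_cons]
    have hcast : ((s0 : Int) + 1) = ((s0 + 1 : Nat) : Int) := by push_cast; ring
    rw [List.filter_cons]
    by_cases hvc : isVowel c
    · simp only [hvc, if_pos, List.map_cons, List.map_append, List.map_map]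
      rw [hcast, ih (s0 + 1)]
      congr 1
      simp only [List.map_nil]
      apply List.map_congr_left
      intro j _
      simp only [Function.comp]
      push_cast
      ring
    · simp only [hvc, Bool.false_eq_true, if_neg, not_false_iff, List.map_append]
      rw [hcast, ih (s0 + 1)]
      simp only [List.map_map]
      apply List.map_congr_left
      intro j _
      simp only [Function.comp]
      push_cast
      ring

lemma bridgeA (kn : Nat) (s : String) :
    long_substring (kn : Int) s = Bval kn s.toList := by
  show (List.foldl (stepA s.toList (kn : Int)) (0, 0, 0) (List.range s.toList.length)).2.2 =
    Bval kn s.toList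
  rw [invA kn s.toList s.toList.length (le_refl _), List.take_length]

lemma bridgeB (kn : Nat) (s : String) :
    long_substring_alt (kn : Int) s = Bval kn s.toList := by
  simp only [long_substring_alt]
  have hpos : ((PySem.List.enumerate s.toList 0).filter (fun p => isVowel p.2)).map
      (fun p => p.1) = (vposN s.toList).map (fun j => Int.ofNat j) := by
    have := enumFilter s.toList 0
    rw [(by norm_num : ((0 : Nat) : Int) = (0 : Int))] at this
    rw [this]
    apply List.map_congr_left
    intro j _
    simp
  rw [hpos]
  set cs := s.toList with hcs
  set P := vposN cs with hP
  have hlen : (P.map (fun j => Int.ofNat j)).length = P.length := by simp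
  rw [hlen]
  by_cases hk : P.length ≤ kn
  · rw [if_pos (by exact_mod_cast hk), Bval, if_pos hk]
  · rw [if_neg (by omega), Bval, if_neg hk]
    have hN : ((P.length : Int) - (kn : Int) + 1) = ((P.length - kn + 1 : Nat) : Int) := by
      push_cast [Nat.cast_sub (by omega : kn ≤ P.length)]; ring
    rw [hN]
    have hpad : (-1 :: P.map (fun j => Int.ofNat j) ++ [(cs.length : Int)]) = padL P cs.length := by
      rfl
    rw [hpad]
    have hmap : (PySem.List.pyRange 0 ((P.length - kn + 1 : Nat) : Int) 1).map
        (fun i => PySem.List.pyGetD (padL P cs.length) (i + (kn : Int) + 1) 0 -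
          PySem.List.pyGetD (padL P cs.length) i 0 - 1) =
        (List.range (P.length - kn + 1)).map
        (fun i => (padL P cs.length).getD (i + kn + 1) 0 - (padL P cs.length).getD i 0 - 1) := by
      apply List.ext_getElem
      · simp [PySem.List.length_pyRange_one]
      · intro i h1 h2
        rw [List.getElem_map, List.getElem_map, PySem.List.getElem_pyRange_one]
        have h3 : ((0 : Int) + (i : Int) + (kn : Int) + 1) = ((i + kn + 1 : Nat) : Int) := by
          push_cast; ring
        have h4 : ((0 : Int) + (i : Int)) = ((i : Nat) : Int) := by ring
        rw [h3]
        rw [PySem.List.pyGetD_natCast]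
        rw [h4, PySem.List.pyGetD_natCast]
        simp [List.getElem_range]
    rw [hmap]
    have hne : List.range (P.length - kn + 1) ≠ [] := by simp
    match hr : (List.range (P.length - kn + 1)).map
        (fun i => (padL P cs.length).getD (i + kn + 1) 0 - (padL P cs.length).getD i 0 - 1) with
    | [] =>
      exfalso
      have := congrArg List.length hr
      simp at this
    | h0 :: rest =>
      rw [PySem.List.max?_id_cons, Option.getD_some, gmax]

-- ===== VERDICT (by name: the statement is the Claim_ definition above) =====
theorem long_substring_spec : Claim_equal_long_substring := by
  intro k s _ hPre
  unfold Spec_long_substring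
  obtain ⟨kn, rfl⟩ := Int.eq_ofNat_of_zero_le hPre
  rw [bridgeA, bridgeB]
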